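-- pv_equiv track=rewrite | github.com/pipinstallshan/form-filler-ai | ai_service.py | generate_referral_answer
-- ===== SOURCE A (Python) =====
-- from typing import Dict, List, Any, Optional
--
-- def generate_referral_answer(field: Dict[str, Any], profile_dict: Dict[str, Any], options: List[str]) -> Optional[str]:
--     label = (field.get('label') or '').lower()
--
--     if 'hear' in label or 'referral' in label or 'find' in label or 'where' in label:
--         if profile_dict.get('linkedinUrl'):
--             for option in options:
--                 if 'linkedin' in option.lower():
--                     return option
--
--         if profile_dict.get('portfolioUrl') or profile_dict.get('websiteUrl'):
--             for option in options:
--                 if any(term in option.lower() for term in ['career', 'website', 'company website']):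
--                     return option
--
--         for option in options:
--             option_lower = option.lower()
--             if any(term in option_lower for term in ['career', 'website', 'company']):
--                 return option
--
--         if options:
--             return options[0]
--
--     return None
-- ===== SOURCE B (Python) =====
-- def generate_referral_answer(field, profile_dict, options):
--     label = (field.get('label') or '').lower()
--     if not any(k in label for k in ('hear', 'referral', 'find', 'where')):
--         return None
--     groups = []
--     if profile_dict.get('linkedinUrl'):
--         groups.append(['linkedin'])
--     if profile_dict.get('portfolioUrl') or profile_dict.get('websiteUrl'):
--         groups.append(['career', 'website', 'company website'])
--     groups.append(['career', 'website', 'company'])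
--     # single pass over options: record the FIRST option matching each priority group
--     firsts = [None] * len(groups)
--     for opt in options:
--         low = opt.lower()
--         for g, terms in enumerate(groups):
--             if firsts[g] is None and any(t in low for t in terms):
--                 firsts[g] = opt
--     for f in firsts:
--         if f is not None:
--             return f
--     return options[0] if options else None
-- ===== Notes on version B (the rewrite author's own statement) =====
-- stated objective: alternative
-- what changed: Replaced A's staged early-return scans (up to three full passes over options, one per priority tier) with a single pass over options that records the first match for every priority group in per-group accumulator slots, then returns the highest-priority recorded match.
import Mathlib
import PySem

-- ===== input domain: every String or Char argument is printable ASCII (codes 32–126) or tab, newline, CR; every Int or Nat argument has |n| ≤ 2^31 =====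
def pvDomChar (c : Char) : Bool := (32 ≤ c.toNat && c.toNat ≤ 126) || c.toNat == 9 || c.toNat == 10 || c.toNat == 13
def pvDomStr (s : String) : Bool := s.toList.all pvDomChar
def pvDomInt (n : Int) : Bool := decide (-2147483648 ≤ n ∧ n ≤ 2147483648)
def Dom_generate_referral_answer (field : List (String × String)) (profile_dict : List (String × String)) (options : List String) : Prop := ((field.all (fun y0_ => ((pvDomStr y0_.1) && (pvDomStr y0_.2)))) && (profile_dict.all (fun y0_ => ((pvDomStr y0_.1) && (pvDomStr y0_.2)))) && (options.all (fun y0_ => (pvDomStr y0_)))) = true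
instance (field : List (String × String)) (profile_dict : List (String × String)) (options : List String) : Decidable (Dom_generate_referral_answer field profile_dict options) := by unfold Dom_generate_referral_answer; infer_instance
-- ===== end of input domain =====

-- B replaces A's staged early-return scans over options with ONE pass over options that
-- records the first match per priority group in accumulator slots (objective: alternative).


-- ===== PORT A =====
-- truthiness of d.get(k): present with a non-empty string value (None and '' are falsy)
def pvTruthyGet (d : List (String × String)) (k : String) : Bool :=
  decide ((d.lookup k).getD "" ≠ "")

def generate_referral_answer (field : List (String × String)) (profile_dict : List (String × String)) (options : List String) : Option String :=
  let label := PySem.Str.lower ((field.lookup "label").getD "")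
  if PySem.Str.isIn "hear" label || PySem.Str.isIn "referral" label ||
     PySem.Str.isIn "find" label || PySem.Str.isIn "where" label then
    -- first loop: linkedin, only when linkedinUrl is truthy
    match (if pvTruthyGet profile_dict "linkedinUrl" then
             options.find? (fun o => PySem.Str.isIn "linkedin" (PySem.Str.lower o))
           else none) with
    | some o => some o
    | none =>
      -- second loop: portfolio/website terms, only when portfolioUrl or websiteUrl is truthy
      match (if pvTruthyGet profile_dict "portfolioUrl" || pvTruthyGet profile_dict "websiteUrl" then
               options.find? (fun o => ["career", "website", "company website"].any
                 (fun t => PySem.Str.isIn t (PySem.Str.lower o)))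
             else none) with
      | some o => some o
      | none =>
        -- third loop: generic terms, always
        match options.find? (fun o => ["career", "website", "company"].any
                (fun t => PySem.Str.isIn t (PySem.Str.lower o))) with
        | some o => some o
        | none => options.head?   -- 'if options: return options[0]' then 'return None'
  else none

-- ===== PORT B =====
-- does option o (lowercased) contain any of the group's terms?
def grMatch (terms : List String) (o : String) : Bool :=
  terms.any (fun t => PySem.Str.isIn t (PySem.Str.lower o))

-- inner loop of the single pass: fill each still-empty slot whose group matches opt
def grStep (groups : List (List String)) (firsts : List (Option String)) (opt : String) : List (Option String) :=
  List.zipWith (fun f terms => match f with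
                | some x => some x
                | none => if grMatch terms opt then some opt else none) firsts groups

def generate_referral_answer_alt (field : List (String × String)) (profile_dict : List (String × String)) (options : List String) : Option String :=
  let label := PySem.Str.lower ((field.lookup "label").getD "")
  if ¬ (["hear", "referral", "find", "where"].any (fun k => PySem.Str.isIn k label)) then none
  else
    let groups :=
      (if decide ((profile_dict.lookup "linkedinUrl").getD "" ≠ "") then [["linkedin"]] else []) ++
      (if decide ((profile_dict.lookup "portfolioUrl").getD "" ≠ "" ∨ (profile_dict.lookup "websiteUrl").getD "" ≠ "") then
         [["career", "website", "company website"]] else []) ++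
      [["career", "website", "company"]]
    let firsts := options.foldl (grStep groups) (groups.map (fun _ => none))
    match firsts.findSome? id with
    | some f => some f
    | none => options.head?   -- 'options[0] if options else None'

-- ===== PRECONDITION & SPEC =====
def Spec_generate_referral_answer (field : List (String × String)) (profile_dict : List (String × String)) (options : List String) (out : Option String) : Prop := out = generate_referral_answer_alt field profile_dict options
instance (field : List (String × String)) (profile_dict : List (String × String)) (options : List String) (out : Option String) : Decidable (Spec_generate_referral_answer field profile_dict options out) := by unfold Spec_generate_referral_answer; infer_instance

-- ===== CLAIM (what is proved, stated in full; the proofs are below) =====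
def Claim_equal_generate_referral_answer : Prop := ∀ (field : List (String × String)) (profile_dict : List (String × String)) (options : List String), Dom_generate_referral_answer field profile_dict options → Spec_generate_referral_answer field profile_dict options (generate_referral_answer field profile_dict options)

-- ===== LEMMAS AND PROOFS =====

lemma zipWith_id_left {α β : Type} (acc : List α) (groups : List β)
    (h : acc.length = groups.length) :
    List.zipWith (fun a (_ : β) => a) acc groups = acc := by
  induction acc generalizing groups with
  | nil => simp
  | cons a as ih =>
    cases groups with
    | nil => simp at h
    | cons g gs => simp [List.zipWith, ih gs (by simpa using h)]

lemma zipWith_zipWith {α β γ δ : Type} (f : γ → β → δ) (g : α → β → γ)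
    (acc : List α) (groups : List β) :
    List.zipWith f (List.zipWith g acc groups) groups
      = List.zipWith (fun a t => f (g a t) t) acc groups := by
  induction acc generalizing groups with
  | nil => simp
  | cons a as ih =>
    cases groups with
    | nil => simp
    | cons t ts => simp [List.zipWith, ih]

lemma zipWith_map_left {α β γ : Type} (F : α → β → γ) (c : α) (groups : List β) :
    List.zipWith F (groups.map (fun _ => c)) groups = groups.map (fun t => F c t) := by
  induction groups with
  | nil => rfl
  | cons t ts ih => simp only [List.map_cons, List.zipWith_cons_cons, ih]

-- invariant of B's single pass: each slot ends up holding its group's first match in opts,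
-- unless it was already filled
lemma zipWith_ext {α β γ : Type} (f g : α → β → γ) (h : ∀ a b, f a b = g a b)
    (l1 : List α) (l2 : List β) : List.zipWith f l1 l2 = List.zipWith g l1 l2 := by
  induction l1 generalizing l2 with
  | nil => simp
  | cons a as ih =>
    cases l2 with
    | nil => simp
    | cons b bs => simp only [List.zipWith_cons_cons, h, ih]

lemma fold_grStep (opts : List String) (groups : List (List String))
    (acc : List (Option String)) (h : acc.length = groups.length) :
    opts.foldl (grStep groups) acc
      = List.zipWith (fun a terms => match a with
            | some x => some x
            | none => opts.find? (grMatch terms)) acc groups := by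
  induction opts generalizing acc with
  | nil =>
    simp only [List.foldl_nil]
    have : List.zipWith (fun a (terms : List String) => match a with
        | some x => some x
        | none => ([] : List String).find? (grMatch terms)) acc groups
        = List.zipWith (fun a (_ : List String) => a) acc groups := by
      apply zipWith_ext
      intro a t; cases a <;> rfl
    rw [this, zipWith_id_left acc groups h]
  | cons o rest ih =>
    have hlen : (grStep groups acc o).length = groups.length := by
      simp [grStep, List.length_zipWith, h]
    rw [List.foldl_cons, ih (grStep groups acc o) hlen]
    unfold grStep
    rw [zipWith_zipWith]
    apply zipWith_ext
    intro a t
    cases a with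
    | some x => rfl
    | none =>
      by_cases hm : grMatch t o = true
      · simp [hm, List.find?]
      · simp [hm, List.find?]

lemma firsts_eq (opts : List String) (groups : List (List String)) :
    opts.foldl (grStep groups) (groups.map (fun _ => none))
      = groups.map (fun terms => opts.find? (grMatch terms)) := by
  rw [fold_grStep opts groups _ (by simp)]
  exact zipWith_map_left _ none groups

-- B's per-group slots, specialised to the two profile flags, give A's chain of three scans
lemma gr_core (li pw : Bool) (options : List String) :
    (match (if li then options.find? (fun o => PySem.Str.isIn "linkedin" (PySem.Str.lower o)) else none) with
     | some o => some o
     | none =>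
       match (if pw then options.find? (fun o => ["career", "website", "company website"].any
                (fun t => PySem.Str.isIn t (PySem.Str.lower o))) else none) with
       | some o => some o
       | none =>
         match options.find? (fun o => ["career", "website", "company"].any
                 (fun t => PySem.Str.isIn t (PySem.Str.lower o))) with
         | some o => some o
         | none => options.head?) =
    (match (List.findSome? id
        (((if li then [["linkedin"]] else []) ++
          (if pw then [["career", "website", "company website"]] else []) ++
          [["career", "website", "company"]]).map (fun terms => options.find? (grMatch terms)))) with
     | some f => some f
     | none => options.head?) := by
  have h2 : ∀ terms : List String, grMatch terms
      = (fun o => terms.any (fun t => PySem.Str.isIn t (PySem.Str.lower o))) :=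
    fun terms => funext fun o => rfl
  have h1 : (fun o => (["linkedin"] : List String).any (fun t => PySem.Str.isIn t (PySem.Str.lower o)))
      = (fun o => PySem.Str.isIn "linkedin" (PySem.Str.lower o)) := by
    funext o; simp
  cases li <;> cases pw <;>
    simp only [Bool.false_eq_true, if_false, if_true, List.nil_append, List.cons_append,
      List.append_nil, List.map, h2, h1] <;>
    (cases options.find? (fun o => PySem.Str.isIn "linkedin" (PySem.Str.lower o)) <;>
     cases options.find? (fun o => (["career", "website", "company website"] : List String).any
        (fun t => PySem.Str.isIn t (PySem.Str.lower o))) <;>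
     cases options.find? (fun o => (["career", "website", "company"] : List String).any
        (fun t => PySem.Str.isIn t (PySem.Str.lower o))) <;>
     simp [List.findSome?])

-- ===== VERDICT (by name: the statement is the Claim_ definition above) =====
theorem generate_referral_answer_spec : Claim_equal_generate_referral_answer := by
  intro field profile_dict options _
  unfold Spec_generate_referral_answer generate_referral_answer generate_referral_answer_alt
    pvTruthyGet
  have hany : (["hear", "referral", "find", "where"].any
        (fun k => PySem.Str.isIn k (PySem.Str.lower ((field.lookup "label").getD ""))))
      = (PySem.Str.isIn "hear" (PySem.Str.lower ((field.lookup "label").getD "")) ||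
         PySem.Str.isIn "referral" (PySem.Str.lower ((field.lookup "label").getD "")) ||
         PySem.Str.isIn "find" (PySem.Str.lower ((field.lookup "label").getD "")) ||
         PySem.Str.isIn "where" (PySem.Str.lower ((field.lookup "label").getD ""))) := by
    simp [List.any_cons, List.any_nil, Bool.or_assoc]
  simp only [hany]
  by_cases hlab : (PySem.Str.isIn "hear" (PySem.Str.lower ((field.lookup "label").getD "")) ||
      PySem.Str.isIn "referral" (PySem.Str.lower ((field.lookup "label").getD "")) ||
      PySem.Str.isIn "find" (PySem.Str.lower ((field.lookup "label").getD "")) ||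
      PySem.Str.isIn "where" (PySem.Str.lower ((field.lookup "label").getD ""))) = true
  · rw [if_pos hlab, if_neg (not_not_intro hlab), Bool.decide_or]
    rw [firsts_eq]
    exact gr_core _ _ options
  · rw [if_neg hlab, if_pos hlab]
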